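-- pv_equiv track=rewrite | github.com/pisterlabs/promptset | data/scraping/repos/coveo-labs~store-generator/5_pushToCatalog.py | createCategoriesPaths
-- ===== SOURCE A (Python) =====
-- def createCategoriesPaths(categories):
--   catpath=''
--   catpaths=[]
--   for cat in categories:
--      if catpath=='':
--        catpath=cat #man
--        catpaths.append(catpath)
--      else:
--        catpath=catpath+'|'+cat
--        catpaths.append(catpath)
--   #catpaths = list(set(catpaths))
--   return catpaths
-- ===== SOURCE B (Python) =====
-- def createCategoriesPaths(categories):
--   return ['|'.join(categories[:i+1]) for i in range(len(categories))]
-- ===== Notes on version B (the rewrite author's own statement) =====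
-- stated objective: simpler
-- what changed: Replaces the explicit loop with a sentinel-valued running accumulator by a one-line comprehension that pipe-joins each prefix slice of the list.
-- intended difference: On lists of length >= 2 whose first element is the empty string, A's '' sentinel makes it silently restart the path (e.g. ['','a'] -> ['','a']), while B uniformly pipe-joins every prefix (['','a'] -> ['','|a']), which is the intended cumulative category path. — e.g. on createCategoriesPaths(["", "a"]): A returns ["", "a"], B returns ["", "|a"]
import Mathlib
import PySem

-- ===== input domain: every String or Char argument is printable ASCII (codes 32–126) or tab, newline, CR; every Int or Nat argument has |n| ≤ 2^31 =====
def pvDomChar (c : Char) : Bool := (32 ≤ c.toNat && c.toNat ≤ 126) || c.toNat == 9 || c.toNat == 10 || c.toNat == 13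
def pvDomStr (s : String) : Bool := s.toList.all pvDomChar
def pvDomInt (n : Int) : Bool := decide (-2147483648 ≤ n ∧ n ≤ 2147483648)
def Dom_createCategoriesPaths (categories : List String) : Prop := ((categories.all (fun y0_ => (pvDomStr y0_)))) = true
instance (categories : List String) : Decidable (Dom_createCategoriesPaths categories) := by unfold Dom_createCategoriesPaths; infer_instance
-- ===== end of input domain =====

-- B replaces A's sentinel-accumulator loop by a prefix-slice/join comprehension (simpler, not faster);
-- on lists of length >= 2 starting with "" the two intentionally differ (see D_ below).


-- ===== PORT A =====
def createCategoriesPaths (categories : List String) : List String :=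
  (categories.foldl
    (fun (st : String × List String) cat =>
      if st.1 == "" then (cat, st.2 ++ [cat])
      else (st.1 ++ "|" ++ cat, st.2 ++ [st.1 ++ "|" ++ cat]))
    ("", [])).2

-- ===== PORT B =====
def createCategoriesPaths_alt (categories : List String) : List String :=
  (PySem.List.pyRange 0 (categories.length : Int) 1).map
    (fun i => PySem.Str.join "|" (PySem.List.slice categories none (some (i + 1))))

-- ===== PRECONDITION & SPEC =====
-- On lists of length >= 2 whose first element is "", A's '' sentinel silently restarts the path
-- (['','a'] -> ['','a']) while B pipe-joins every prefix (['','a'] -> ['','|a']), the intended cumulative path.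
def D_createCategoriesPaths (categories : List String) : Prop :=
  2 ≤ categories.length ∧ categories.head? = some ""
instance (categories : List String) : Decidable (D_createCategoriesPaths categories) := by
  unfold D_createCategoriesPaths; infer_instance

def Spec_createCategoriesPaths (categories : List String) (out : List String) : Prop :=
  ¬ D_createCategoriesPaths categories → out = createCategoriesPaths_alt categories
instance (categories : List String) (out : List String) : Decidable (Spec_createCategoriesPaths categories out) := by
  unfold Spec_createCategoriesPaths; infer_instance

def pvDiffWitness_createCategoriesPaths : List String := ["", "a"]
def pvDiffWitnessOut_createCategoriesPaths : (List String) × (List String) := (["", "a"], ["", "|a"])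

-- ===== CLAIM (what is proved, stated in full; the proofs are below) =====
def Claim_unchanged_createCategoriesPaths : Prop := ∀ (categories : List String), Dom_createCategoriesPaths categories → Spec_createCategoriesPaths categories (createCategoriesPaths categories)
def Claim_changed_createCategoriesPaths : Prop := Dom_createCategoriesPaths (pvDiffWitness_createCategoriesPaths) ∧ D_createCategoriesPaths (pvDiffWitness_createCategoriesPaths) ∧ createCategoriesPaths (pvDiffWitness_createCategoriesPaths) = pvDiffWitnessOut_createCategoriesPaths.1 ∧ createCategoriesPaths_alt (pvDiffWitness_createCategoriesPaths) = pvDiffWitnessOut_createCategoriesPaths.2 ∧ pvDiffWitnessOut_createCategoriesPaths.1 ≠ pvDiffWitnessOut_createCategoriesPaths.2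
def Claim_exact_createCategoriesPaths : Prop := ∀ (categories : List String), Dom_createCategoriesPaths categories → D_createCategoriesPaths categories → createCategoriesPaths categories ≠ createCategoriesPaths_alt categories

-- ===== LEMMAS AND PROOFS =====

-- paths accumulated by both programs (proof-side helper)
def pvAccum : String → List String → List String
  | acc, [] => [acc]
  | acc, c :: cs => acc :: pvAccum (acc ++ "|" ++ c) cs

theorem pv_ne_empty (a b : String) : a ++ "|" ++ b ≠ "" := by
  intro h
  have := congrArg String.toList h
  simp at this

theorem pv_join_singleton (a : String) : PySem.Str.join "|" [a] = a := by
  rw [← String.toList_inj, PySem.Str.toList_join]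
  simp [PySem.Chars.join_singleton]

theorem pv_join_cons_cons (a b : String) (t : List String) :
    PySem.Str.join "|" (a :: b :: t) = PySem.Str.join "|" ((a ++ "|" ++ b) :: t) := by
  rw [← String.toList_inj, PySem.Str.toList_join, PySem.Str.toList_join]
  cases t with
  | nil =>
    simp [PySem.Chars.join_cons_cons, PySem.Chars.join_singleton, String.toList_append]
  | cons y r =>
    simp [PySem.Chars.join_cons_cons, String.toList_append]

-- B equals pvAccum
theorem pv_alt_eq_accum (cs : List String) (acc : String) :
    (List.range (cs.length + 1)).map
      (fun i => PySem.Str.join "|" ((acc :: cs).take (i + 1))) = pvAccum acc cs := by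
  induction cs generalizing acc with
  | nil => simp [pvAccum, pv_join_singleton]
  | cons c l ih =>
    rw [List.range_succ_eq_map, List.map_cons, List.map_map]
    have h2 : ∀ i ∈ List.range (l.length + 1),
        ((fun i => PySem.Str.join "|" ((acc :: c :: l).take (i + 1))) ∘ Nat.succ) i
          = PySem.Str.join "|" (((acc ++ "|" ++ c) :: l).take (i + 1)) := by
      intro i _
      show PySem.Str.join "|" ((acc :: c :: l).take (i + 1 + 1)) = _
      rw [List.take_succ_cons, List.take_succ_cons, List.take_succ_cons, pv_join_cons_cons]
    simp only [List.length_cons]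
    rw [List.map_congr_left h2, ih]
    simp [pvAccum, pv_join_singleton]

theorem pv_alt_def (categories : List String) :
    createCategoriesPaths_alt categories =
      (List.range categories.length).map
        (fun i => PySem.Str.join "|" (categories.take (i + 1))) := by
  unfold createCategoriesPaths_alt
  rw [PySem.List.pyRange_one, List.map_map]
  simp only [Int.sub_zero, Int.toNat_natCast]
  apply List.map_congr_left
  intro k _
  show PySem.Str.join "|" (PySem.List.slice categories none (some ((0 : Int) + k + 1))) = _
  have h : ((0 : Int) + k + 1) = ((k + 1 : Nat) : Int) := by push_cast; ring
  rw [h, PySem.List.slice_to_natCast]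

-- A's fold with a non-empty accumulator
theorem pv_fold_eq_accum (cs : List String) (acc : String) (out : List String) (h : acc ≠ "") :
    (cs.foldl
      (fun (st : String × List String) cat =>
        if st.1 == "" then (cat, st.2 ++ [cat])
        else (st.1 ++ "|" ++ cat, st.2 ++ [st.1 ++ "|" ++ cat]))
      (acc, out ++ [acc])).2 = out ++ pvAccum acc cs := by
  induction cs generalizing acc out with
  | nil => simp [pvAccum]
  | cons c l ih =>
    simp only [List.foldl_cons, pvAccum]
    rw [if_neg (by simpa using h)]
    have := ih (acc ++ "|" ++ c) (out ++ [acc]) (pv_ne_empty acc c)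
    simpa using this

theorem pv_fold_prefix (cs : List String) (st : String × List String) :
    ∃ t, (cs.foldl
      (fun (st : String × List String) cat =>
        if st.1 == "" then (cat, st.2 ++ [cat])
        else (st.1 ++ "|" ++ cat, st.2 ++ [st.1 ++ "|" ++ cat]))
      st).2 = st.2 ++ t := by
  induction cs generalizing st with
  | nil => exact ⟨[], by simp⟩
  | cons c l ih =>
    simp only [List.foldl_cons]
    by_cases h : st.1 == ""
    · rw [if_pos h]
      obtain ⟨t, ht⟩ := ih (c, st.2 ++ [c])
      exact ⟨[c] ++ t, by simpa using ht⟩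
    · rw [if_neg h]
      obtain ⟨t, ht⟩ := ih (st.1 ++ "|" ++ c, st.2 ++ [st.1 ++ "|" ++ c])
      exact ⟨[st.1 ++ "|" ++ c] ++ t, by simpa using ht⟩

-- ===== VERDICT (by name: the statement is the Claim_ definition above) =====
theorem createCategoriesPaths_spec : Claim_unchanged_createCategoriesPaths := by
  intro categories _ hD
  rw [pv_alt_def]
  match categories with
  | [] => rfl
  | [c] => simp [createCategoriesPaths, pv_join_singleton]
  | c :: c2 :: l =>
    have hc : c ≠ "" := by
      intro h
      exact hD ⟨by simp, by simp [h]⟩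
    have hA : createCategoriesPaths (c :: c2 :: l) = pvAccum c (c2 :: l) := by
      unfold createCategoriesPaths
      rw [List.foldl_cons, if_pos (by simp)]
      have := pv_fold_eq_accum (c2 :: l) c [] hc
      simpa using this
    rw [hA, show (c :: c2 :: l).length = (c2 :: l).length + 1 from rfl,
        pv_alt_eq_accum (c2 :: l) c]

theorem createCategoriesPaths_changed : Claim_changed_createCategoriesPaths := by
  unfold Claim_changed_createCategoriesPaths; decide

theorem createCategoriesPaths_tight : Claim_exact_createCategoriesPaths := by
  intro categories _ hD heq
  obtain ⟨hlen, hhead⟩ := hD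
  cases categories with
  | nil => simp at hhead
  | cons c rest =>
  cases rest with
  | nil => simp at hlen
  | cons c2 l =>
    have hc : c = "" := by simpa using hhead
    subst hc
    obtain ⟨t, ht⟩ := pv_fold_prefix l (c2, ["", c2])
    have hA : createCategoriesPaths ("" :: c2 :: l) = ["", c2] ++ t := by
      unfold createCategoriesPaths
      rw [List.foldl_cons, if_pos (by simp), List.foldl_cons, if_pos (by simp)]
      exact ht
    have hB1 : (createCategoriesPaths_alt ("" :: c2 :: l))[1]? = some ("" ++ "|" ++ c2) := by
      rw [pv_alt_def]
      rw [List.getElem?_map, List.getElem?_range (by simp)]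
      simp only [Option.map_some]
      rw [show (("" :: c2 :: l).take (1 + 1)) = ["", c2] from rfl,
          pv_join_cons_cons, pv_join_singleton]
    have hA1 : (createCategoriesPaths ("" :: c2 :: l))[1]? = some c2 := by
      rw [hA]; rfl
    rw [heq, hB1] at hA1
    have := Option.some.inj hA1
    have hlen2 := congrArg (fun s => s.toList.length) this
    simp [String.toList_append] at hlen2
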